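-- pv_equiv track=rewrite | github.com/ktny/atcoder | ABC121/d.py | f
-- ===== SOURCE A (Python) =====
-- def f(n, k):
--     if n < 0:
--         return 0
--     if n // 2**k == 0:
--         if n >= 2**(k-1):
--             return n - 2**(k-1) + 1
--         else:
--             return 0
--     else:
--         return int((n // 2**k) * (2**(k-1))) + f(n-(n // 2**k)*(2**k), k)
-- ===== SOURCE B (Python) =====
-- def f(n, k):
--     if n < 0:
--         return 0
--     half = 2 ** (k - 1)
--     q, rem = divmod(n, 2 * half)
--     part = rem - half + 1 if rem >= half else 0
--     return q * half + part
-- ===== Notes on version B (the rewrite author's own statement) =====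
-- stated objective: simpler
-- what changed: Replaces A's recursion (peel off full 2^k blocks until the quotient is 0) by a direct closed-form computation with one divmod: q*2^(k-1) plus the partial-block term.
-- outside the precondition, e.g. on f(5, 0): A returns 2, B returns 2.5; on f(5, -2): A returns 2, B returns 2.5
import Mathlib
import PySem

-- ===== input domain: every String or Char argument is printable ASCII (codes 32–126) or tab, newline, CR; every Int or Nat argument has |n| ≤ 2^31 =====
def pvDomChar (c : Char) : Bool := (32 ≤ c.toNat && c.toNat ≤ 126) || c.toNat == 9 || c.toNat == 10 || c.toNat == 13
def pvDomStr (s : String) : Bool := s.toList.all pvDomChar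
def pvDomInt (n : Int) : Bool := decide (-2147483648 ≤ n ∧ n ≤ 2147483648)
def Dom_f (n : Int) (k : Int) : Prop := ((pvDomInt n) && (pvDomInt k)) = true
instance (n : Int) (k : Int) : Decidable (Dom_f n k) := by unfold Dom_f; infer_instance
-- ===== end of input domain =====

-- B replaces A's block-peeling recursion by one divmod and a closed-form sum (objective: simpler).

-- ===== PORT A =====
-- 2**k / 2**(k-1) are ported as (2:Int)^k.toNat / (2:Int)^(k-1).toNat: exact for k ≥ 1
-- (and irrelevant for n < 0); for n ≥ 0, k ≤ 0 the Python computes through floats, excluded by Pre_f.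
def f (n : Int) (k : Int) : Int :=
  if n < 0 then 0
  else if PySem.Int.floordiv n ((2:Int) ^ k.toNat) = 0 then
    if n ≥ (2:Int) ^ (k - 1).toNat then n - (2:Int) ^ (k - 1).toNat + 1 else 0
  else
    (PySem.Int.floordiv n ((2:Int) ^ k.toNat)) * (2:Int) ^ (k - 1).toNat
      + f (n - (PySem.Int.floordiv n ((2:Int) ^ k.toNat)) * (2:Int) ^ k.toNat) k
termination_by n.toNat
decreasing_by
  rename_i h0 h1
  have hp : (0:Int) < (2:Int) ^ k.toNat := by positivity
  have hq0 : 0 ≤ PySem.Int.floordiv n ((2:Int) ^ k.toNat) := by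
    rw [PySem.Int.floordiv_eq_ediv_of_pos hp]
    exact Int.ediv_nonneg (by omega) (le_of_lt hp)
  have hqp : PySem.Int.floordiv n ((2:Int) ^ k.toNat) * (2:Int) ^ k.toNat
      + PySem.Int.mod n ((2:Int) ^ k.toNat) = n := PySem.Int.floordiv_mul_add_mod n _
  have hm0 : 0 ≤ PySem.Int.mod n ((2:Int) ^ k.toNat) := PySem.Int.mod_nonneg n hp
  have hq1 : 1 ≤ PySem.Int.floordiv n ((2:Int) ^ k.toNat) := by omega
  have : (2:Int) ^ k.toNat ≤ PySem.Int.floordiv n ((2:Int) ^ k.toNat) * (2:Int) ^ k.toNat :=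
    le_mul_of_one_le_left (le_of_lt hp) hq1
  omega

-- ===== PORT B =====
def f_alt (n : Int) (k : Int) : Int :=
  if n < 0 then 0
  else
    let half := (2:Int) ^ (k - 1).toNat
    let q := PySem.Int.floordiv n (2 * half)
    let rem := PySem.Int.mod n (2 * half)
    let part := if rem ≥ half then rem - half + 1 else 0
    q * half + part

-- ===== PRECONDITION & SPEC =====
-- Pre_f excludes n ≥ 0 with k ≤ 0: there Python's 2**(k-1) (and for k < 0 also 2**k) is a
-- float, so A's value is produced by float arithmetic and cannot be ported under the type
-- convention; B returns a float there as well (a different one).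
def Pre_f (n : Int) (k : Int) : Prop := n < 0 ∨ 1 ≤ k
instance (n : Int) (k : Int) : Decidable (Pre_f n k) := by unfold Pre_f; infer_instance
def pvWitness_f : Int × Int := (13, 3)
def Spec_f (n : Int) (k : Int) (out : Int) : Prop := out = f_alt n k
instance (n : Int) (k : Int) (out : Int) : Decidable (Spec_f n k out) := by unfold Spec_f; infer_instance

-- ===== CLAIM (what is proved, stated in full; the proofs are below) =====
def Claim_equal_f : Prop := ∀ (n : Int) (k : Int), Dom_f n k → Pre_f n k → Spec_f n k (f n k)

-- ===== LEMMAS AND PROOFS =====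

theorem pow_split (k : Int) (hk : 1 ≤ k) :
    (2:Int) ^ k.toNat = 2 * (2:Int) ^ (k - 1).toNat := by
  have : k.toNat = (k - 1).toNat + 1 := by omega
  rw [this, pow_succ]; ring

-- ===== VERDICT (by name: the statement is the Claim_ definition above) =====
theorem f_spec : Claim_equal_f := by
  intro n k _ hpre
  unfold Spec_f
  by_cases hn : n < 0
  · rw [f, f_alt]; simp [hn]
  · have hk : 1 ≤ k := by rcases hpre with h | h <;> omega
    have hps := pow_split k hk
    set half := (2:Int) ^ (k - 1).toNat with hhalf
    have hh : (0:Int) < half := by positivity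
    have hp : (0:Int) < (2:Int) ^ k.toNat := by positivity
    set q := PySem.Int.floordiv n ((2:Int) ^ k.toNat) with hq
    set r := PySem.Int.mod n ((2:Int) ^ k.toNat) with hr
    have hqp : q * (2:Int) ^ k.toNat + r = n := PySem.Int.floordiv_mul_add_mod n _
    have hm0 : 0 ≤ r := PySem.Int.mod_nonneg n hp
    have hmlt : r < (2:Int) ^ k.toNat := PySem.Int.mod_lt n hp
    have halt : f_alt n k = q * half + (if r ≥ half then r - half + 1 else 0) := by
      rw [f_alt]
      simp only [if_neg hn]
      rw [← hhalf, ← hps, ← hq, ← hr]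
    by_cases hq0 : q = 0
    · have hnr : n = r := by rw [hq0, zero_mul, zero_add] at hqp; omega
      rw [f]
      simp only [if_neg hn, ← hq, if_pos hq0]
      rw [halt, hq0, hnr, ← hhalf, zero_mul, zero_add]
    · rw [f]
      simp only [if_neg hn, ← hq, if_neg hq0]
      have hrec : n - q * (2:Int) ^ k.toNat = r := by omega
      rw [hrec]
      have hr0 : PySem.Int.floordiv r ((2:Int) ^ k.toNat) = 0 := by
        rw [PySem.Int.floordiv_eq_iff_of_pos hp]
        constructor <;> omega
      rw [f]
      simp only [if_neg (by omega : ¬ r < 0), hr0]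
      simp only [if_true]
      rw [halt, ← hhalf]
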